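-- pv_equiv track=rewrite | github.com/jeniferestefaniamv/PROGRAMAS-PHYTON | p112-suma-pares-impares.py | sumaparesimpares
-- ===== SOURCE A (Python) =====
-- def sumaparesimpares(ini, fin):
--     spar = 0
--     simpar = 0
--     pares = []
--     impares = []
--     for i in range(ini, fin+1):
--         if i % 2 == 0 :
--             pares.append(i)
--             spar += i
--         else:
--             impares.append(i)
--             simpar += i
--     return pares, impares, spar, simpar
-- ===== SOURCE B (Python) =====
-- def sumaparesimpares(ini, fin):
--     first_even = ini + (ini % 2)
--     first_odd = ini + (1 - ini % 2)
--     pares = list(range(first_even, fin + 1, 2))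
--     impares = list(range(first_odd, fin + 1, 2))
--     return pares, impares, sum(pares), sum(impares)
-- ===== Notes on version B (the rewrite author's own statement) =====
-- stated objective: simpler
-- what changed: Replaces the single loop that tests each element's parity with an if/else by direct construction of the two stride-2 ranges (evens from ini + ini%2, odds from ini + (1 - ini%2)) and their sums.
import Mathlib
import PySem

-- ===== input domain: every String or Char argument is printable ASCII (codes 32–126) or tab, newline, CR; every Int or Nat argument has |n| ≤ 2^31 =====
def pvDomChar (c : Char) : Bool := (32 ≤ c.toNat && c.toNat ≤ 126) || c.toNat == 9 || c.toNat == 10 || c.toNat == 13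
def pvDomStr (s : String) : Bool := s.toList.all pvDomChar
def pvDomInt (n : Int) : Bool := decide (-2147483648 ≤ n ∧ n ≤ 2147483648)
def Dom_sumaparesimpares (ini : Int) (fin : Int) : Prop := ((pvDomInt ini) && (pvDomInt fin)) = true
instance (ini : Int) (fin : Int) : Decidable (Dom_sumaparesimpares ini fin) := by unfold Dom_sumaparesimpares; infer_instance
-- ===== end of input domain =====

-- B replaces A's single loop with an if/else parity test by two arithmetic stride-2 ranges
-- (evens from ini + ini%2, odds from ini + (1 - ini%2)) plus their sums (objective: simpler).

-- ===== PORT A =====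
-- A: one pass over range(ini, fin+1), appending each i to pares or impares by i % 2 and
-- accumulating spar/simpar; state is (pares, impares, spar, simpar).
def sumaparesimpares (ini : Int) (fin : Int) : List Int × List Int × Int × Int :=
  (PySem.List.pyRange ini (fin + 1) 1).foldl
    (fun (st : List Int × List Int × Int × Int) i =>
      let (pares, impares, spar, simpar) := st
      if PySem.Int.mod i 2 = 0 then (pares ++ [i], impares, spar + i, simpar)
      else (pares, impares ++ [i], spar, simpar + i))
    ([], [], 0, 0)

-- ===== PORT B =====
def sumaparesimpares_alt (ini : Int) (fin : Int) : List Int × List Int × Int × Int :=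
  let firstEven := ini + PySem.Int.mod ini 2
  let firstOdd := ini + (1 - PySem.Int.mod ini 2)
  let pares := PySem.List.pyRange firstEven (fin + 1) 2
  let impares := PySem.List.pyRange firstOdd (fin + 1) 2
  (pares, impares, pares.sum, impares.sum)

-- ===== PRECONDITION & SPEC =====
def Spec_sumaparesimpares (ini : Int) (fin : Int) (out : List Int × List Int × Int × Int) : Prop := out = sumaparesimpares_alt ini fin
instance (ini : Int) (fin : Int) (out : List Int × List Int × Int × Int) : Decidable (Spec_sumaparesimpares ini fin out) := by unfold Spec_sumaparesimpares; infer_instance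

-- ===== CLAIM (what is proved, stated in full; the proofs are below) =====
def Claim_equal_sumaparesimpares : Prop := ∀ (ini : Int) (fin : Int), Dom_sumaparesimpares ini fin → Spec_sumaparesimpares ini fin (sumaparesimpares ini fin)

-- ===== LEMMAS AND PROOFS =====

-- step-2 range is empty when the interval is
lemma pyRange_two_eq_nil {a b : Int} (h : b ≤ a) : PySem.List.pyRange a b 2 = [] := by
  rw [PySem.List.pyRange_of_pos a b (by norm_num : (0:Int) < 2)]
  simp [if_neg (not_lt.2 h)]

-- peel the head off a step-2 range
lemma pyRange_two_cons {a b : Int} (h : a < b) :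
    PySem.List.pyRange a b 2 = a :: PySem.List.pyRange (a + 2) b 2 := by
  rw [PySem.List.pyRange_of_pos a b (by norm_num : (0:Int) < 2),
      PySem.List.pyRange_of_pos (a + 2) b (by norm_num : (0:Int) < 2)]
  by_cases h2 : a + 2 < b
  · rw [if_pos h, if_pos h2]
    have hc : ((b - a + 2 - 1) / 2).toNat = ((b - (a + 2) + 2 - 1) / 2).toNat + 1 := by omega
    rw [hc, List.range_succ_eq_map]
    simp only [List.map_cons, List.map_map]
    refine List.cons_eq_cons.mpr ⟨by push_cast; ring, ?_⟩
    apply List.map_congr_left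
    intro k _
    simp only [Function.comp]
    push_cast; ring
  · rw [if_pos h, if_neg h2]
    have hc : ((b - a + 2 - 1) / 2).toNat = 1 := by omega
    simp [hc, List.range_succ]

-- the loop invariant: folding A's body over range(ini, fin+1) appends the two stride-2
-- ranges to the list accumulators and adds their sums to the numeric accumulators
lemma loop_inv (n : Nat) : ∀ (ini fin : Int) (p im : List Int) (sp si : Int),
    (fin + 1 - ini).toNat = n →
    (PySem.List.pyRange ini (fin + 1) 1).foldl
      (fun (st : List Int × List Int × Int × Int) i =>
        let (pares, impares, spar, simpar) := st
        if PySem.Int.mod i 2 = 0 then (pares ++ [i], impares, spar + i, simpar)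
        else (pares, impares ++ [i], spar, simpar + i))
      (p, im, sp, si)
    = (p ++ PySem.List.pyRange (ini + PySem.Int.mod ini 2) (fin + 1) 2,
       im ++ PySem.List.pyRange (ini + (1 - PySem.Int.mod ini 2)) (fin + 1) 2,
       sp + (PySem.List.pyRange (ini + PySem.Int.mod ini 2) (fin + 1) 2).sum,
       si + (PySem.List.pyRange (ini + (1 - PySem.Int.mod ini 2)) (fin + 1) 2).sum) := by
  induction n with
  | zero =>
    intro ini fin p im sp si hn
    have hle : fin + 1 ≤ ini := by omega
    have hm := PySem.Int.mod_nonneg ini (b := 2) (by norm_num)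
    have hm2 := PySem.Int.mod_lt ini (b := 2) (by norm_num)
    rw [PySem.List.pyRange_one_eq_nil hle,
        pyRange_two_eq_nil (by omega), pyRange_two_eq_nil (by omega)]
    simp
  | succ n ih =>
    intro ini fin p im sp si hn
    have hlt : ini < fin + 1 := by omega
    have hmod : PySem.Int.mod ini 2 = ini % 2 :=
      PySem.Int.mod_eq_emod_of_pos (by norm_num)
    have hmod1 : PySem.Int.mod (ini + 1) 2 = (ini + 1) % 2 :=
      PySem.Int.mod_eq_emod_of_pos (by norm_num)
    rw [PySem.List.pyRange_one_cons hlt, List.foldl_cons]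
    dsimp only
    by_cases he : PySem.Int.mod ini 2 = 0
    · -- ini even: it heads the evens range
      have h0 : ini % 2 = 0 := by omega
      rw [if_pos he,
          ih (ini + 1) fin (p ++ [ini]) im (sp + ini) si (by omega)]
      have hfe : ini + PySem.Int.mod ini 2 = ini := by omega
      have hfe' : ini + 1 + PySem.Int.mod (ini + 1) 2 = ini + 2 := by omega
      have hfo : ini + (1 - PySem.Int.mod ini 2) = ini + 1 := by omega
      have hfo' : ini + 1 + (1 - PySem.Int.mod (ini + 1) 2) = ini + 1 := by omega
      rw [hfe, hfe', hfo, hfo', pyRange_two_cons hlt]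
      simp; ring
    · -- ini odd: it heads the odds range
      have h1 : ini % 2 = 1 := by
        have := Int.emod_two_eq ini; omega
      rw [if_neg he,
          ih (ini + 1) fin p (im ++ [ini]) sp (si + ini) (by omega)]
      have hfe : ini + PySem.Int.mod ini 2 = ini + 1 := by omega
      have hfe' : ini + 1 + PySem.Int.mod (ini + 1) 2 = ini + 1 := by omega
      have hfo : ini + (1 - PySem.Int.mod ini 2) = ini := by omega
      have hfo' : ini + 1 + (1 - PySem.Int.mod (ini + 1) 2) = ini + 2 := by omega
      rw [hfe, hfe', hfo, hfo', pyRange_two_cons hlt]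
      simp; ring

-- ===== VERDICT (by name: the statement is the Claim_ definition above) =====
theorem sumaparesimpares_spec : Claim_equal_sumaparesimpares := by
  intro ini fin _
  unfold Spec_sumaparesimpares sumaparesimpares sumaparesimpares_alt
  rw [loop_inv (fin + 1 - ini).toNat ini fin [] [] 0 0 rfl]
  simp
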